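-- pv_equiv track=rewrite | github.com/LanZhang-UCL/AMLS_II_assignment19_20 | further_test.py | split_topic
-- ===== SOURCE A (Python) =====
-- def split_topic(topic, y_true, y_pred):
--     new_topic = []
--     new_true = []
--     new_pred = []
--     for i in range(0, len(topic)):
--         if topic[i] in new_topic:
--             j = new_topic.index(topic[i])
--             new_true[j].append(y_true[i])
--             new_pred[j].append(y_pred[i])
--         else:
--             new_topic.append(topic[i])
--             new_true.append([y_true[i]])
--             new_pred.append([y_pred[i]])
--     return new_topic, new_true, new_pred
-- ===== SOURCE B (Python) =====
-- def split_topic(topic, y_true, y_pred):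
--     new_topic = list(dict.fromkeys(topic))
--     new_true = [[a for s, a in zip(topic, y_true) if s == t] for t in new_topic]
--     new_pred = [[p for s, p in zip(topic, y_pred) if s == t] for t in new_topic]
--     return new_topic, new_true, new_pred
-- ===== Notes on version B (the rewrite author's own statement) =====
-- stated objective: alternative
-- what changed: Replaces A's single-pass incremental grouping (mutable parallel lists updated per element via membership test and list.index) by a staged declarative computation: first dedup the topics in first-seen order, then build each group in one shot by filtering the zipped (topic, value) pairs per distinct topic.
import Mathlib
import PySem

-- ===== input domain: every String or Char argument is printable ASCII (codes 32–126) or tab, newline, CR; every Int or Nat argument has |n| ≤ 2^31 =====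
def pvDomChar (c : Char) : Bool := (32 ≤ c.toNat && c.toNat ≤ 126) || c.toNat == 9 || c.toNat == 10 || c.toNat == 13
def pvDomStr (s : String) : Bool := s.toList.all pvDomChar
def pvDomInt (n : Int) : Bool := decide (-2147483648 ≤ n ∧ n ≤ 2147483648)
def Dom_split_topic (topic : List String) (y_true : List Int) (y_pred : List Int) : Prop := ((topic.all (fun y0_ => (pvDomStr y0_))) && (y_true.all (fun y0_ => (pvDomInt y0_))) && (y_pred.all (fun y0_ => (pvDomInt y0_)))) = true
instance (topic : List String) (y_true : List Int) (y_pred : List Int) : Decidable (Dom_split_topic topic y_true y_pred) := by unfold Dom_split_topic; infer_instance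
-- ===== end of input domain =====

-- B replaces A's single-pass incremental grouping by a staged computation: dedup the topics
-- first, then build every group by filtering the zipped pairs per distinct topic; objective: alternative.


-- ===== PORT A =====
-- Python's 'topic[i] in new_topic' followed by 'new_topic.index(topic[i])' is ported as one
-- match on PySem.List.index? (some j ↔ the membership test succeeds and .index returns j);
-- 'new_true[j].append(v)' is ported as setting slot j to its old value ++ [v].
def split_topic (topic : List String) (y_true : List Int) (y_pred : List Int) : List String × List (List Int) × List (List Int) :=
  (PySem.List.pyRange 0 (topic.length) 1).foldl
    (fun (st : List String × List (List Int) × List (List Int)) i =>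
      match PySem.List.index? st.1 (PySem.List.pyGetD topic i "") with
      | some j =>
          (st.1,
           st.2.1.set j ((st.2.1.getD j []) ++ [PySem.List.pyGetD y_true i 0]),
           st.2.2.set j ((st.2.2.getD j []) ++ [PySem.List.pyGetD y_pred i 0]))
      | none =>
          (st.1 ++ [PySem.List.pyGetD topic i ""],
           st.2.1 ++ [[PySem.List.pyGetD y_true i 0]],
           st.2.2 ++ [[PySem.List.pyGetD y_pred i 0]]))
    ([], [], [])

-- ===== PORT B =====
-- Source B: 'list(dict.fromkeys(topic))' is PySem.List.dedup (first occurrences in order);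
-- each comprehension '[a for s, a in zip(topic, ys) if s == t]' is filter-then-map over the zip.
def split_topic_alt (topic : List String) (y_true : List Int) (y_pred : List Int) : List String × List (List Int) × List (List Int) :=
  let new_topic := PySem.List.dedup topic
  (new_topic,
   new_topic.map (fun t => ((topic.zip y_true).filter (fun x => x.1 == t)).map (fun x => x.2)),
   new_topic.map (fun t => ((topic.zip y_pred).filter (fun x => x.1 == t)).map (fun x => x.2)))

-- ===== PRECONDITION & SPEC =====
-- Pre_ excludes exactly the inputs on which A raises IndexError: topic longer than y_true or y_pred.
def Pre_split_topic (topic : List String) (y_true : List Int) (y_pred : List Int) : Prop :=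
  topic.length ≤ y_true.length ∧ topic.length ≤ y_pred.length
instance (topic : List String) (y_true : List Int) (y_pred : List Int) : Decidable (Pre_split_topic topic y_true y_pred) := by unfold Pre_split_topic; infer_instance
def pvWitness_split_topic : List String × List Int × List Int := (["a", "b", "a"], [1, 2, 3], [4, 5, 6])

def Spec_split_topic (topic : List String) (y_true : List Int) (y_pred : List Int) (out : List String × List (List Int) × List (List Int)) : Prop := out = split_topic_alt topic y_true y_pred
instance (topic : List String) (y_true : List Int) (y_pred : List Int) (out : List String × List (List Int) × List (List Int)) : Decidable (Spec_split_topic topic y_true y_pred out) := by unfold Spec_split_topic; infer_instance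

-- ===== CLAIM =====
def Claim_equal_split_topic : Prop := ∀ (topic : List String) (y_true : List Int) (y_pred : List Int), Dom_split_topic topic y_true y_pred → Pre_split_topic topic y_true y_pred → Spec_split_topic topic y_true y_pred (split_topic topic y_true y_pred)

-- ===== LEMMAS AND PROOFS =====

-- A's loop body, on a (topic, (y_true, y_pred)) element
def pvStepA (st : List String × List (List Int) × List (List Int)) (x : String × Int × Int) : List String × List (List Int) × List (List Int) :=
  match PySem.List.index? st.1 x.1 with
  | some j =>
      (st.1, st.2.1.set j ((st.2.1.getD j []) ++ [x.2.1]), st.2.2.set j ((st.2.2.getD j []) ++ [x.2.2]))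
  | none => (st.1 ++ [x.1], st.2.1 ++ [[x.2.1]], st.2.2 ++ [[x.2.2]])

-- the closed (dedup + filter) form of the grouping, on the zipped triples
def pvCanon (l : List (String × Int × Int)) : List String × List (List Int) × List (List Int) :=
  (PySem.Set.ofList (l.map (fun x => x.1)),
   (PySem.Set.ofList (l.map (fun x => x.1))).map (fun t => (l.filter (fun x => x.1 == t)).map (fun x => x.2.1)),
   (PySem.Set.ofList (l.map (fun x => x.1))).map (fun t => (l.filter (fun x => x.1 == t)).map (fun x => x.2.2)))

theorem pvFilter_nil_of_not_mem (l : List (String × Int × Int)) (t : String)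
    (h : t ∉ l.map (fun x => x.1)) : l.filter (fun x => x.1 == t) = [] := by
  rw [List.filter_eq_nil_iff]
  intro x hx
  simp only [beq_iff_eq]
  exact fun he => h (List.mem_map.mpr ⟨x, hx, he⟩)

theorem pvA_fold_canon (l : List (String × Int × Int)) :
    l.foldl pvStepA ([], [], []) = pvCanon l := by
  induction l using List.reverseRecOn with
  | nil => rfl
  | append_singleton m x ih =>
    rw [List.foldl_append, List.foldl_cons, List.foldl_nil, ih]
    unfold pvCanon
    set ks := PySem.Set.ofList (m.map (fun x => x.1)) with hks
    have hnd : ks.Nodup := PySem.Set.nodup_ofList _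
    have hkeys : PySem.Set.ofList ((m ++ [x]).map (fun x => x.1)) = PySem.Set.add ks x.1 := by
      rw [List.map_append, List.map_singleton, PySem.Set.ofList_append_singleton]
    have hfil : ∀ (t : String), (m ++ [x]).filter (fun y => y.1 == t)
        = m.filter (fun y => y.1 == t) ++ (if x.1 == t then [x] else []) := by
      intro t
      rw [List.filter_append]
      by_cases h : x.1 = t
      · simp [List.filter, h]
      · have hb : (x.1 == t) = false := by simp [h]
        simp [List.filter, hb]
    by_cases hmem : x.1 ∈ ks
    · have hmem' : x.1 ∈ m.map (fun x => x.1) := (PySem.Set.mem_ofList _ _).mp hmem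
      obtain ⟨j, hj⟩ : ∃ j, PySem.List.index? ks x.1 = some j :=
        Option.isSome_iff_exists.mp ((PySem.List.index?_isSome_iff _ _).mpr hmem)
      obtain ⟨hjlt, hkj, hlt⟩ := PySem.List.getElem_of_index?_eq_some hj
      have hadd : PySem.Set.add ks x.1 = ks := PySem.Set.add_of_mem hmem
      have hmap : ∀ (f : String × Int × Int → Int),
          ks.map (fun t => ((m ++ [x]).filter (fun y => y.1 == t)).map (fun y => f y))
            = (ks.map (fun t => (m.filter (fun y => y.1 == t)).map (fun y => f y))).set j
                (((ks.map (fun t => (m.filter (fun y => y.1 == t)).map (fun y => f y))).getD j []) ++ [f x]) := by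
        intro f
        apply List.ext_getElem
        · simp
        · intro i hi hi'
          have hiks : i < ks.length := by simpa using hi
          rw [List.getElem_map]
          by_cases hij : i = j
          · subst hij
            rw [List.getElem_set_self (by simpa using hi')]
            rw [List.getD_eq_getElem _ _ (by simpa using hiks), List.getElem_map]
            rw [hfil, hkj, List.map_append]
            simp
          · rw [List.getElem_set_ne (fun h => hij h.symm), List.getElem_map]
            have hne : (x.1 == ks[i]) = false := by
              simp only [beq_eq_false_iff_ne]
              intro he
              exact hij ((List.Nodup.getElem_inj_iff hnd).mp (by rw [hkj, ← he]))
            rw [hfil, hne]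
            simp
      simp only [pvStepA, hj]
      rw [hkeys, hadd]
      exact Prod.ext rfl (Prod.ext (by exact (hmap (fun y => y.2.1)).symm) (by exact (hmap (fun y => y.2.2)).symm))
    · have hmem' : x.1 ∉ m.map (fun x => x.1) := fun h => hmem ((PySem.Set.mem_ofList _ _).mpr h)
      have hj : PySem.List.index? ks x.1 = none := (PySem.List.index?_eq_none_iff _ _).mpr hmem
      have hadd : PySem.Set.add ks x.1 = ks ++ [x.1] := PySem.Set.add_of_not_mem hmem
      have hmap : ∀ (f : String × Int × Int → Int),
          (ks ++ [x.1]).map (fun t => ((m ++ [x]).filter (fun y => y.1 == t)).map (fun y => f y))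
            = ks.map (fun t => (m.filter (fun y => y.1 == t)).map (fun y => f y)) ++ [[f x]] := by
        intro f
        rw [List.map_append, List.map_singleton]
        congr 1
        · apply List.map_congr_left
          intro t ht
          have hne : (x.1 == t) = false := by
            simp only [beq_eq_false_iff_ne]
            exact fun he => hmem (he ▸ ht)
          rw [hfil, hne]
          simp
        · rw [hfil, pvFilter_nil_of_not_mem m x.1 hmem']
          simp
      simp only [pvStepA, hj]
      rw [hkeys, hadd]
      exact Prod.ext rfl (Prod.ext (by exact (hmap (fun y => y.2.1)).symm) (by exact (hmap (fun y => y.2.2)).symm))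

-- A's index loop over range(len(topic)) is the fold of pvStepA over the zipped triples
theorem pvA_eq_fold (topic : List String) (y_true : List Int) (y_pred : List Int)
    (h1 : topic.length ≤ y_true.length) (h2 : topic.length ≤ y_pred.length) :
    split_topic topic y_true y_pred
      = (topic.zip (y_true.zip y_pred)).foldl pvStepA ([], [], []) := by
  have hlen : (topic.zip (y_true.zip y_pred)).length = topic.length := by
    simp [List.length_zip]; omega
  unfold split_topic
  have hb : ((topic.length : Int)) = ((topic.zip (y_true.zip y_pred)).length : Int) := by
    rw [hlen]
  rw [hb]
  rw [PySem.List.foldl_congr_mem _ _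
    (fun acc j => pvStepA acc (PySem.List.pyGetD (topic.zip (y_true.zip y_pred)) j ("", 0, 0))) _ ?_]
  · exact PySem.List.foldl_pyRange_zero_pyGetD' (topic.zip (y_true.zip y_pred)) ("", 0, 0) pvStepA ([], [], [])
  · intro acc i hi
    rw [PySem.List.mem_pyRange_one] at hi
    obtain ⟨hi0, hi1⟩ := hi
    beta_reduce
    rw [PySem.List.pyGetD_eq_getElem (topic.zip (y_true.zip y_pred)) ("", 0, 0) hi0 (by omega),
        PySem.List.pyGetD_eq_getElem topic "" hi0 (by omega),
        PySem.List.pyGetD_eq_getElem y_true 0 hi0 (by omega),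
        PySem.List.pyGetD_eq_getElem y_pred 0 hi0 (by omega)]
    simp only [List.getElem_zip]
    rfl

-- one per-key group over the zipped triples is the same group over the corresponding 2-zip
theorem pvGroup_zip2 (l : List (String × Int × Int)) (f : String × Int × Int → Int)
    (z : List (String × Int)) (hz : l.map (fun x => (x.1, f x)) = z) (t : String) :
    (l.filter (fun x => x.1 == t)).map f
      = (z.filter (fun x => x.1 == t)).map (fun x => x.2) := by
  subst hz
  rw [List.filter_map, List.map_map]
  rfl

theorem split_topic_spec : Claim_equal_split_topic := by
  intro topic y_true y_pred _ hpre
  obtain ⟨h1, h2⟩ := hpre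
  unfold Spec_split_topic
  rw [pvA_eq_fold topic y_true y_pred h1 h2, pvA_fold_canon]
  set l := topic.zip (y_true.zip y_pred) with hl
  have hlen : l.length = topic.length := by
    simp [hl, List.length_zip]; omega
  have hfst : l.map (fun x => x.1) = topic := by
    apply List.ext_getElem
    · simp [hlen]
    · intro i hi hi'
      simp [hl, List.getElem_zip]
  have hzip1 : l.map (fun x => (x.1, x.2.1)) = topic.zip y_true := by
    apply List.ext_getElem
    · simp [hlen, List.length_zip]; omega
    · intro i hi hi'
      simp [hl, List.getElem_zip]
  have hzip2 : l.map (fun x => (x.1, x.2.2)) = topic.zip y_pred := by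
    apply List.ext_getElem
    · simp [hlen, List.length_zip]; omega
    · intro i hi hi'
      simp [hl, List.getElem_zip]
  unfold split_topic_alt pvCanon
  rw [hfst]
  simp only [PySem.List.dedup_eq_ofList]
  refine Prod.ext rfl (Prod.ext ?_ ?_)
  · apply List.map_congr_left
    intro t _
    exact pvGroup_zip2 l (fun x => x.2.1) (topic.zip y_true) hzip1 t
  · apply List.map_congr_left
    intro t _
    exact pvGroup_zip2 l (fun x => x.2.2) (topic.zip y_pred) hzip2 t
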